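-- pv_equiv track=rewrite | github.com/Ahuanmarca/extraer_texto | funciones/normalizadores_v2.py | eliminar_basuritas_inicio
-- ===== SOURCE A (Python) =====
-- def eliminar_basuritas_inicio(texto: str, basuritas: set[str]) -> str:
--     """
--     Elimina del inicio de cada línea las basuritas especificadas (solo si están al inicio exacto).
--     Sólo elimina la primera ocurrencia de cada basurita en el inicio de la línea.
--     """
--     lineas = texto.splitlines()
--     nuevas_lineas = []
--
--     for linea in lineas:
--         nueva_linea = linea
--         for basurita in sorted(basuritas, key=len, reverse=True):  # Más largas primero
--             if nueva_linea.startswith(basurita):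
--                 nueva_linea = nueva_linea[len(basurita) :]
--                 break  # Solo eliminar una basurita por línea
--         nuevas_lineas.append(nueva_linea)
--
--     return "\n".join(nuevas_lineas)
-- ===== SOURCE B (Python) =====
-- def _corte(linea, basuritas):
--     # length of the longest garbage token that prefixes the line (0 if none)
--     corte = 0
--     for b in basuritas:
--         if len(b) > corte and linea.startswith(b):
--             corte = len(b)
--     return corte
--
--
-- def eliminar_basuritas_inicio(texto: str, basuritas: set[str]) -> str:
--     """
--     Elimina del inicio de cada línea la basurita más larga que esté al inicio exacto.
--     """
--     return "\n".join(linea[_corte(linea, basuritas):] for linea in texto.splitlines())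
-- ===== Notes on version B (the rewrite author's own statement) =====
-- stated objective: simpler
-- what changed: B drops A's per-line sort-by-length-descending-then-break scan and instead computes, in one unsorted pass per line, the maximum length of a matching garbage token, then slices it off; this is correct because two distinct prefixes of the same line can never have equal length, so A's first match in descending order is exactly the longest match.
import Mathlib
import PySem

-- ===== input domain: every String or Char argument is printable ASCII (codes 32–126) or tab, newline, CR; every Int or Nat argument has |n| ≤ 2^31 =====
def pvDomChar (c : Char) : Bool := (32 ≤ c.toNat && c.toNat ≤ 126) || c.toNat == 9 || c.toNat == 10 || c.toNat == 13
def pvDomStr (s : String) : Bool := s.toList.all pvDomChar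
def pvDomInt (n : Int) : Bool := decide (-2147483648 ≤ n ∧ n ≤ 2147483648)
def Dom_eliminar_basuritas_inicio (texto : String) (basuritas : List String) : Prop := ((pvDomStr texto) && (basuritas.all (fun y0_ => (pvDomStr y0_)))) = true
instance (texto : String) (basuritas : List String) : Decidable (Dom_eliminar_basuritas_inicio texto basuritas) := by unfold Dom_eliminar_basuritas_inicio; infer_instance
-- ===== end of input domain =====

-- B replaces A's per-line sort-by-length-then-first-match-break with a single unsorted
-- pass taking the maximum length of a matching token (objective: simpler, no per-line sort).


-- ===== PORT A =====
-- inner 'for basurita in sorted(...): if startswith: strip; break' loop of A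
def pvStripA (linea : String) : List String → String
  | [] => linea
  | b :: rest =>
    if PySem.Str.startswith linea b then
      PySem.Str.slice linea (some (PySem.Str.len b)) none
    else pvStripA linea rest

def eliminar_basuritas_inicio (texto : String) (basuritas : List String) : String :=
  let lineas := PySem.Str.splitlines texto
  let nuevas_lineas : List String :=
    lineas.foldl (fun acc linea =>
      acc ++ [pvStripA linea (PySem.List.sorted basuritas (fun b => PySem.Str.len b) true)]) []
  PySem.Str.join "\n" nuevas_lineas

-- ===== PORT B =====
-- Source B's _corte: max length of a garbage token prefixing the line, one unsorted pass
def pvCorte (linea : String) (basuritas : List String) : Int :=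
  basuritas.foldl (fun corte b =>
    if decide (PySem.Str.len b > corte) && PySem.Str.startswith linea b then PySem.Str.len b
    else corte) 0

def eliminar_basuritas_inicio_alt (texto : String) (basuritas : List String) : String :=
  PySem.Str.join "\n" ((PySem.Str.splitlines texto).map (fun linea =>
    PySem.Str.slice linea (some (pvCorte linea basuritas)) none))

-- ===== PRECONDITION & SPEC =====
def Spec_eliminar_basuritas_inicio (texto : String) (basuritas : List String) (out : String) : Prop := out = eliminar_basuritas_inicio_alt texto basuritas
instance (texto : String) (basuritas : List String) (out : String) : Decidable (Spec_eliminar_basuritas_inicio texto basuritas out) := by unfold Spec_eliminar_basuritas_inicio; infer_instance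

-- ===== CLAIM (what is proved, stated in full; the proofs are below) =====
def Claim_equal_eliminar_basuritas_inicio : Prop := ∀ (texto : String) (basuritas : List String), Dom_eliminar_basuritas_inicio texto basuritas → Spec_eliminar_basuritas_inicio texto basuritas (eliminar_basuritas_inicio texto basuritas)

-- ===== LEMMAS AND PROOFS =====

-- the max-fold both sides reduce to
def pvG (linea : String) (c : Int) (b : String) : Int :=
  if PySem.Str.startswith linea b then max c (PySem.Str.len b) else c

theorem foldl_cut_eq_foldl_pvG (linea : String) (xs : List String) (c : Int) :
    xs.foldl (fun corte b =>
      if decide (PySem.Str.len b > corte) && PySem.Str.startswith linea b then PySem.Str.len b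
      else corte) c = xs.foldl (pvG linea) c := by
  induction xs generalizing c with
  | nil => rfl
  | cons b rest ih =>
      rw [List.foldl_cons, List.foldl_cons, ih]
      congr 1
      unfold pvG
      cases PySem.Str.startswith linea b
      · simp only [Bool.and_false, Bool.false_eq_true, if_false]
      · simp only [Bool.and_true, if_true, PySem.Str.len_eq, gt_iff_lt, decide_eq_true_eq]
        split_ifs <;> omega

theorem pvCorte_eq (linea : String) (xs : List String) :
    pvCorte linea xs = xs.foldl (pvG linea) 0 :=
  foldl_cut_eq_foldl_pvG linea xs 0

theorem pvG_rcomm (linea : String) (c : Int) (a b : String) :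
    pvG linea (pvG linea c a) b = pvG linea (pvG linea c b) a := by
  unfold pvG
  cases PySem.Str.startswith linea a <;>
    cases PySem.Str.startswith linea b <;>
      simp only [Bool.false_eq_true, if_false, if_true] <;> omega

theorem foldl_pvG_absorb (linea : String) (xs : List String) (c : Int)
    (h : ∀ b ∈ xs, PySem.Str.startswith linea b = true → PySem.Str.len b ≤ c) :
    xs.foldl (pvG linea) c = c := by
  induction xs with
  | nil => rfl
  | cons b rest ih =>
      have hb : pvG linea c b = c := by
        unfold pvG
        by_cases hsw : PySem.Str.startswith linea b
        · rw [if_pos hsw]; exact max_eq_left (h b (by simp) hsw)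
        · rw [if_neg hsw]
      rw [List.foldl_cons, hb]
      exact ih (fun x hx hs => h x (by simp [hx]) hs)

theorem len_nonneg (s : String) : 0 ≤ PySem.Str.len s := by
  simp [PySem.Str.len_eq]

theorem slice_zero (s : String) : PySem.Str.slice s (some 0) none = s := by
  apply String.toList_inj.mp
  simp [PySem.Str.toList_slice, PySem.Chars.slice_eq_listSlice,
    PySem.List.slice_zero_start, PySem.List.slice_none_none]

-- A's first-match-in-descending-length-order strip is the longest-match strip
theorem pvStripA_eq (linea : String) (L : List String)
    (hp : L.Pairwise (fun a b => PySem.Str.len b ≤ PySem.Str.len a)) :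
    pvStripA linea L = PySem.Str.slice linea (some (L.foldl (pvG linea) 0)) none := by
  induction L with
  | nil => simpa [pvStripA] using (slice_zero linea).symm
  | cons b rest ih =>
      rcases List.pairwise_cons.mp hp with ⟨hb, hrest⟩
      rw [List.foldl_cons]
      by_cases hsw : PySem.Str.startswith linea b
      · have h0 : pvG linea 0 b = PySem.Str.len b := by
          unfold pvG; rw [if_pos hsw]; exact max_eq_right (len_nonneg b)
        have habs : rest.foldl (pvG linea) (PySem.Str.len b) = PySem.Str.len b :=
          foldl_pvG_absorb linea rest _ (fun x hx _ => hb x hx)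
        rw [h0, habs, pvStripA, if_pos hsw]
      · have h0 : pvG linea 0 b = 0 := by unfold pvG; rw [if_neg hsw]
        rw [h0, pvStripA, if_neg hsw, ih hrest]

theorem foldl_pvG_sorted (linea : String) (basuritas : List String) :
    (PySem.List.sorted basuritas (fun b => PySem.Str.len b) true).foldl (pvG linea) 0
      = basuritas.foldl (pvG linea) 0 :=
  List.Perm.foldl_eq (rcomm := ⟨fun c a b => pvG_rcomm linea c a b⟩)
    (PySem.List.sorted_perm basuritas _ _) 0

-- ===== VERDICT (by name: the statement is the Claim_ definition above) =====
theorem eliminar_basuritas_inicio_spec : Claim_equal_eliminar_basuritas_inicio := by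
  intro texto basuritas _
  unfold Spec_eliminar_basuritas_inicio eliminar_basuritas_inicio eliminar_basuritas_inicio_alt
  simp only [PySem.List.foldl_append_singleton_eq_map, List.nil_append]
  congr 1
  apply List.map_congr_left
  intro linea _
  rw [pvStripA_eq linea _ (PySem.List.sorted_pairwise_rev basuritas _),
    foldl_pvG_sorted, pvCorte_eq]
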